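-- pv_equiv track=rewrite | github.com/andrezzarc/ExProg2 | funcoes.py | calcula_pontos_quina
-- ===== SOURCE A (Python) =====
-- def calcula_pontos_quina (l):
--     for i in range (len(l)):
--         contador= 0
--         for a in range (len(l)):
--             if l[i]== l[a]:
--                 contador += 1
--         if contador>=5:
--             return (50)
--     return (0)
-- ===== SOURCE B (Python) =====
-- def calcula_pontos_quina(l):
--     counts = {}
--     for x in l:
--         c = counts.get(x, 0) + 1
--         if c >= 5:
--             return 50
--         counts[x] = c
--     return 0
-- ===== Notes on version B (the rewrite author's own statement) =====
-- stated objective: faster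
-- what changed: Replaces the nested full rescans (for each element, count it over the whole list) with a single pass maintaining a hash-map of occurrence counts, returning 50 the moment any count reaches 5.
import Mathlib
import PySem

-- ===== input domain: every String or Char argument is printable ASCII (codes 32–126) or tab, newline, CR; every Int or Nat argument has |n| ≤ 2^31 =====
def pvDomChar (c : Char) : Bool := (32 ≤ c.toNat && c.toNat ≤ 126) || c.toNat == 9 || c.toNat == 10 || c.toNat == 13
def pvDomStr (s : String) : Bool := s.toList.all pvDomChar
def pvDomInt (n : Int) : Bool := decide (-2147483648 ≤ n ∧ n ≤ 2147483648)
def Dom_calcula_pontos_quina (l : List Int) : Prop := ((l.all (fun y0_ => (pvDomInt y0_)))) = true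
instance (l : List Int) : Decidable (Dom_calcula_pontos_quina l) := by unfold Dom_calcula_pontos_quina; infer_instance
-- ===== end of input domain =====

-- B replaces A's nested rescans with a single pass over the list maintaining a
-- dict of occurrence counts (early exit at 5); same return value on all inputs.


-- ===== PORT A =====
-- inner loop: contador = number of a with l[a] == l[i]
def pvCountEq (x : Int) : List Int → Int
  | [] => 0
  | a :: t => (if x == a then 1 else 0) + pvCountEq x t

-- outer loop over i (l[i] runs over the elements of l in order)
def pvAOuter (l : List Int) : List Int → Int
  | [] => 0
  | x :: rest => if pvCountEq x l ≥ 5 then 50 else pvAOuter l rest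

def calcula_pontos_quina (l : List Int) : Int := pvAOuter l l

-- ===== PORT B =====
def pvBLoop (counts : PySem.Dict Int Int) : List Int → Int
  | [] => 0
  | x :: rest =>
    let c := counts.getD x 0 + 1
    if c ≥ 5 then 50 else pvBLoop (counts.insert x c) rest

def calcula_pontos_quina_alt (l : List Int) : Int := pvBLoop PySem.Dict.empty l

-- ===== PRECONDITION & SPEC =====
def Spec_calcula_pontos_quina (l : List Int) (out : Int) : Prop := out = calcula_pontos_quina_alt l
instance (l : List Int) (out : Int) : Decidable (Spec_calcula_pontos_quina l out) := by unfold Spec_calcula_pontos_quina; infer_instance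

-- ===== CLAIM (what is proved, stated in full; the proofs are below) =====
def Claim_equal_calcula_pontos_quina : Prop := ∀ (l : List Int), Dom_calcula_pontos_quina l → Spec_calcula_pontos_quina l (calcula_pontos_quina l)

-- ===== LEMMAS AND PROOFS =====

theorem pvCountEq_eq_count (x : Int) (l : List Int) : pvCountEq x l = (l.count x : Int) := by
  induction l with
  | nil => simp [pvCountEq]
  | cons a t ih =>
    simp only [pvCountEq, ih, List.count_cons]
    by_cases h : x = a
    · simp [h]; omega
    · simp [h, Ne.symm h, beq_iff_eq]

theorem pvAOuter_eq (l rest : List Int) :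
    pvAOuter l rest = if ∃ x ∈ rest, 5 ≤ (l.count x : Int) then 50 else 0 := by
  induction rest with
  | nil => simp [pvAOuter]
  | cons x t ih =>
    simp only [pvAOuter, pvCountEq_eq_count, ih, ge_iff_le]
    by_cases h : 5 ≤ (l.count x : Int)
    · rw [if_pos h, if_pos ⟨x, List.mem_cons_self .., h⟩]
    · simp only [if_neg h]
      by_cases h2 : ∃ y ∈ t, 5 ≤ (l.count y : Int)
      · rw [if_pos h2, if_pos]
        obtain ⟨y, hy, h5⟩ := h2
        exact ⟨y, List.mem_cons_of_mem _ hy, h5⟩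
      · rw [if_neg h2, if_neg]
        rintro ⟨y, hy, h5⟩
        rcases List.mem_cons.mp hy with rfl | hy
        · exact h h5
        · exact h2 ⟨y, hy, h5⟩

theorem pvBLoop_eq (rest p : List Int) (counts : PySem.Dict Int Int)
    (hc : ∀ x, counts.getD x 0 = (p.count x : Int))
    (hb : ∀ x, (p.count x : Int) ≤ 4) :
    pvBLoop counts rest = if ∃ x ∈ p ++ rest, 5 ≤ ((p ++ rest).count x : Int) then 50 else 0 := by
  induction rest generalizing p counts with
  | nil =>
    simp only [pvBLoop, List.append_nil]
    rw [if_neg]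
    rintro ⟨x, _, h5⟩
    exact absurd (le_trans h5 (hb x)) (by norm_num)
  | cons x t ih =>
    simp only [pvBLoop, hc]
    by_cases h : (p.count x : Int) + 1 ≥ 5
    · rw [if_pos h, if_pos]
      refine ⟨x, by simp, ?_⟩
      have : p.count x + 1 ≤ (p ++ x :: t).count x := by
        simp [List.count_append, List.count_cons_self]
      have := (Int.ofNat_le.mpr this)
      push_cast at this ⊢
      omega
    · rw [if_neg h]
      have key := ih (p ++ [x]) (counts.insert x ((p.count x : Int) + 1)) ?_ ?_
      · rw [key, List.append_assoc, List.singleton_append]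
      · intro y
        rw [PySem.Dict.getD_insert]
        by_cases hxy : y = x
        · subst hxy; simp [List.count_append]
        · have : (p ++ [x]).count y = p.count y := by
            simp [List.count_append, Ne.symm hxy]
          simp [hxy, hc, this]
      · intro y
        by_cases hxy : y = x
        · subst hxy
          simp only [List.count_append, List.count_singleton]
          push_cast
          omega
        · have : (p ++ [x]).count y = p.count y := by
            simp [List.count_append, Ne.symm hxy]
          rw [this]; exact hb y

-- ===== VERDICT (by name: the statement is the Claim_ definition above) =====
theorem calcula_pontos_quina_spec : Claim_equal_calcula_pontos_quina := by
  intro l _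
  unfold Spec_calcula_pontos_quina calcula_pontos_quina calcula_pontos_quina_alt
  rw [pvAOuter_eq]
  have := pvBLoop_eq l [] PySem.Dict.empty (by simp) (by simp)
  simpa using this.symm
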